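-- pv_equiv track=rewrite | github.com/remycloyd/projects | python Programs/recordBreaker.py | recBreak
-- ===== SOURCE A (Python) =====
-- def recBreak(listy):
--     lowCount = highCount = 0
--     min = max = listy[0]
--     for i in listy:
--         if i < min:
--             min = i
--             lowCount+=1
--         elif i > max:
--             max = i
--             highCount +=1
--     return(highCount, lowCount)
-- ===== SOURCE B (Python) =====
-- def recBreak(listy):
--     m = listy[0]
--     mins = [m]
--     maxs = [m]
--     for x in listy[1:]:
--         mins.append(x if x < mins[-1] else mins[-1])
--         maxs.append(x if x > maxs[-1] else maxs[-1])
--     highCount = sum(1 for a, b in zip(maxs, maxs[1:]) if b > a)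
--     lowCount = sum(1 for a, b in zip(mins, mins[1:]) if b < a)
--     return (highCount, lowCount)
-- ===== Notes on version B (the rewrite author's own statement) =====
-- stated objective: alternative
-- what changed: B first materialises the prefix-minimum and prefix-maximum sequences with two scan lists, then counts the strict drops/rises between adjacent prefix values, instead of A's single loop mutating min/max and two counters with an if/elif chain.
import Mathlib
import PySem

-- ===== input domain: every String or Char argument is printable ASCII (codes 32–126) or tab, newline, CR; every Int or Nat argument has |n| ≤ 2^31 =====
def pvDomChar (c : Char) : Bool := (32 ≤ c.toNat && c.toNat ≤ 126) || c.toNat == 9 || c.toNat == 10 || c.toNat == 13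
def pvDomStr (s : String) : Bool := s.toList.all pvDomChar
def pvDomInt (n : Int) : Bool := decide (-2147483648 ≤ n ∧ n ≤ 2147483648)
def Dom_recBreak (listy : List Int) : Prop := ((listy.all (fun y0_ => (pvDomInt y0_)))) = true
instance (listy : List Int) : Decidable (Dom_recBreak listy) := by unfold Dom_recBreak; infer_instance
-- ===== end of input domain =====

-- B materialises the prefix-min/prefix-max sequences and counts adjacent strict drops/rises,
-- instead of A's single mutating min/max loop; same cost, different decomposition.

-- ===== PORT A =====
def recBreak (listy : List Int) : Int × Int :=
  match PySem.List.pyGet? listy 0 with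
  | none => (0, 0)   -- IndexError on the first-element access here; excluded by Pre_recBreak
  | some h =>
    let st := listy.foldl (fun (s : Int × Int × Int × Int) i =>
      if i < s.2.2.1 then (s.1 + 1, s.2.1, i, s.2.2.2)
      else if i > s.2.2.2 then (s.1, s.2.1 + 1, s.2.2.1, i)
      else s) (0, 0, h, h)
    (st.2.1, st.1)

-- ===== PORT B =====
def recBreak_alt (listy : List Int) : Int × Int :=
  match PySem.List.pyGet? listy 0 with
  | none => (0, 0)   -- IndexError on the first-element access here; excluded by Pre_recBreak
  | some m =>
    let p := (PySem.List.slice listy (some 1) none).foldl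
      (fun (p : List Int × List Int) x =>
        (p.1 ++ [if x < p.1.getLast! then x else p.1.getLast!],
         p.2 ++ [if x > p.2.getLast! then x else p.2.getLast!]))
      ([m], [m])
    let highCount : Int :=
      ((p.2.zip (PySem.List.slice p.2 (some 1) none)).countP (fun ab => decide (ab.1 < ab.2)) : Nat)
    let lowCount : Int :=
      ((p.1.zip (PySem.List.slice p.1 (some 1) none)).countP (fun ab => decide (ab.2 < ab.1)) : Nat)
    (highCount, lowCount)

-- ===== PRECONDITION & SPEC =====
-- A indexes the first element, so the empty list raises IndexError; Pre_ excludes exactly it.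
def Pre_recBreak (listy : List Int) : Prop := listy ≠ []
instance (listy : List Int) : Decidable (Pre_recBreak listy) := by unfold Pre_recBreak; infer_instance
def pvWitness_recBreak : List Int := [3, 1, 4, 1, 5]

def Spec_recBreak (listy : List Int) (out : Int × Int) : Prop := out = recBreak_alt listy
instance (listy : List Int) (out : Int × Int) : Decidable (Spec_recBreak listy out) := by unfold Spec_recBreak; infer_instance

-- ===== CLAIM (what is proved, stated in full; the proofs are below) =====
def Claim_equal_recBreak : Prop := ∀ (listy : List Int), Dom_recBreak listy → Pre_recBreak listy → Spec_recBreak listy (recBreak listy)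

-- ===== LEMMAS AND PROOFS =====

-- recursive characterisations used by the proof only
def scanL (f : Int → Int → Int) : Int → List Int → List Int
  | m, [] => [m]
  | m, x :: xs => m :: scanL f (f m x) xs

def fmin (m x : Int) : Int := if x < m then x else m
def fmax (m x : Int) : Int := if x > m then x else m

def LC : Int → List Int → Nat
  | _, [] => 0
  | m, x :: xs => if x < m then 1 + LC x xs else LC m xs
def HC : Int → List Int → Nat
  | _, [] => 0
  | m, x :: xs => if x > m then 1 + HC x xs else HC m xs

theorem getLast!_concat (l : List Int) (a : Int) : (l ++ [a]).getLast! = a := by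
  induction l with
  | nil => rfl
  | cons b l ih =>
    cases l with
    | nil => rfl
    | cons c l => simpa [List.getLast!] using ih

-- B's pair-building foldl equals the two recursive scans
theorem b_fold_scan (xs : List Int) : ∀ (a b : List Int) (m M : Int),
    xs.foldl (fun (p : List Int × List Int) x =>
        (p.1 ++ [if x < p.1.getLast! then x else p.1.getLast!],
         p.2 ++ [if x > p.2.getLast! then x else p.2.getLast!]))
      (a ++ [m], b ++ [M])
    = (a ++ scanL fmin m xs, b ++ scanL fmax M xs) := by
  induction xs with
  | nil => intro a b m M; simp [scanL]
  | cons x xs ih =>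
    intro a b m M
    have h1 : (a ++ [m]).getLast! = m := getLast!_concat a m
    have h2 : (b ++ [M]).getLast! = M := getLast!_concat b M
    simp only [List.foldl_cons, h1, h2]
    have := ih (a ++ [m]) (b ++ [M]) (fmin m x) (fmax M x)
    simp only [List.append_assoc, List.cons_append, List.nil_append] at this ⊢
    simpa [scanL, fmin, fmax] using this

theorem scan_head (f : Int → Int → Int) (m : Int) (xs : List Int) :
    ∃ t, scanL f m xs = m :: t := by
  cases xs <;> exact ⟨_, rfl⟩

theorem count_min (xs : List Int) : ∀ m,
    ((scanL fmin m xs).zip ((scanL fmin m xs).tail)).countP (fun ab => decide (ab.2 < ab.1))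
    = LC m xs := by
  induction xs with
  | nil => intro m; simp [scanL, LC]
  | cons x xs ih =>
    intro m
    obtain ⟨t, ht⟩ := scan_head fmin (fmin m x) xs
    have hih := ih (fmin m x)
    rw [ht] at hih
    simp only [scanL, ht, List.zip_cons_cons, List.tail_cons, List.countP_cons] at hih ⊢
    by_cases h : x < m
    · simp only [LC, fmin, h, if_true] at hih ⊢
      simp [hih]
      omega
    · simp only [LC, fmin, h, if_false] at hih ⊢
      simp [hih]

theorem count_max (xs : List Int) : ∀ m,
    ((scanL fmax m xs).zip ((scanL fmax m xs).tail)).countP (fun ab => decide (ab.1 < ab.2))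
    = HC m xs := by
  induction xs with
  | nil => intro m; simp [scanL, HC]
  | cons x xs ih =>
    intro m
    obtain ⟨t, ht⟩ := scan_head fmax (fmax m x) xs
    have hih := ih (fmax m x)
    rw [ht] at hih
    simp only [scanL, ht, List.zip_cons_cons, List.tail_cons, List.countP_cons] at hih ⊢
    by_cases h : m < x
    · simp only [HC, fmax, gt_iff_lt, h, if_true] at hih ⊢
      simp [hih]
      omega
    · simp only [HC, fmax, gt_iff_lt, h, if_false] at hih ⊢
      simp [hih]

theorem a_fold (xs : List Int) : ∀ (low high mn mx : Int), mn ≤ mx →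
    (xs.foldl (fun (s : Int × Int × Int × Int) i =>
      if i < s.2.2.1 then (s.1 + 1, s.2.1, i, s.2.2.2)
      else if i > s.2.2.2 then (s.1, s.2.1 + 1, s.2.2.1, i)
      else s) (low, high, mn, mx)).1 = low + (LC mn xs : Int)
    ∧ (xs.foldl (fun (s : Int × Int × Int × Int) i =>
      if i < s.2.2.1 then (s.1 + 1, s.2.1, i, s.2.2.2)
      else if i > s.2.2.2 then (s.1, s.2.1 + 1, s.2.2.1, i)
      else s) (low, high, mn, mx)).2.1 = high + (HC mx xs : Int) := by
  induction xs with
  | nil => intro low high mn mx _; simp [LC, HC]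
  | cons x xs ih =>
    intro low high mn mx hle
    simp only [List.foldl_cons]
    by_cases h1 : x < mn
    · rw [if_pos (show x < (low, high, mn, mx).2.2.1 from h1)]
      have := ih (low + 1) high x mx (le_trans h1.le hle)
      refine ⟨?_, ?_⟩
      · rw [this.1]; simp [LC, h1]; ring
      · rw [this.2]
        have : ¬ x > mx := by omega
        simp [HC, this]
    · rw [if_neg (show ¬ x < (low, high, mn, mx).2.2.1 from h1)]
      by_cases h2 : x > mx
      · rw [if_pos (show x > (low, high, mn, mx).2.2.2 from h2)]
        have := ih low (high + 1) mn x (by omega)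
        refine ⟨?_, ?_⟩
        · rw [this.1]; simp [LC, h1]
        · rw [this.2]; simp [HC, h2]; ring
      · rw [if_neg (show ¬ x > (low, high, mn, mx).2.2.2 from h2)]
        have := ih low high mn mx hle
        refine ⟨?_, ?_⟩
        · rw [this.1]; simp [LC, h1]
        · rw [this.2]; simp [HC, h2]

-- ===== VERDICT (by name: the statement is the Claim_ definition above) =====
theorem recBreak_spec : Claim_equal_recBreak := by
  intro listy _ hpre
  unfold Spec_recBreak
  cases listy with
  | nil => exact absurd rfl hpre
  | cons h t =>
    show recBreak (h :: t) = recBreak_alt (h :: t)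
    have hfold := b_fold_scan t [] [] h h
    simp only [List.nil_append] at hfold
    have hA := a_fold t 0 0 h h le_rfl
    obtain ⟨tm, htm⟩ := scan_head fmin h t
    obtain ⟨tM, htM⟩ := scan_head fmax h t
    simp only [recBreak, recBreak_alt, PySem.List.pyGet?_zero_cons,
      PySem.List.slice_from_one, List.foldl_cons, lt_irrefl, gt_iff_lt,
      if_false, hfold, List.tail_cons]
    rw [hA.1, hA.2]
    rw [count_max t h, count_min t h]
    simp
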